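-- pv_equiv track=rewrite | github.com/anCode1143/Neetcode150 | Backtracking/beautifulSubsets.py | beautifulSubsets
-- ===== SOURCE A (Python) =====
-- from typing import List
--
-- def beautifulSubsets(nums: List[int], k: int) -> int:
--     def isBeautiful(arr, candidate) -> bool:
--         for element in arr:
--             if abs(element - candidate) == k:
--                 return False
--         return True
--
--     answer = []
--     def backtracking(index, curr):
--         if index == len(nums):
--             if curr:
--                 answer.append(curr)
--             return
--         if isBeautiful(curr, nums[index]):
--             curr.append(nums[index])
--             backtracking(index+1, curr)
--             curr.pop()
--         backtracking(index+1, curr)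
--     backtracking(0, [])
--     return len(answer)
-- ===== SOURCE B (Python) =====
-- from typing import List
--
-- def rob(chain, k):
--     # house-robber over a strictly increasing same-residue chain of (value, count)
--     g1, g2, v_next = 1, 1, None
--     for v, c in reversed(chain):
--         g0 = (2 ** c - 1) * (g2 if v_next == v + k else g1) + g1
--         g2, g1, v_next = g1, g0, v
--     return g1
--
-- def beautifulSubsets(nums: List[int], k: int) -> int:
--     if k < 0:
--         return 2 ** len(nums) - 1
--     counts = {}
--     for v in nums:
--         counts[v] = counts.get(v, 0) + 1
--     if k == 0:
--         total = 1
--         for c in counts.values():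
--             total *= c + 1
--         return total - 1
--     items = sorted(counts.items(), key=lambda p: p[0])
--     residues = []
--     for v, c in items:
--         if v % k not in residues:
--             residues.append(v % k)
--     total = 1
--     for r in residues:
--         chain = [(v, c) for (v, c) in items if v % k == r]
--         total *= rob(chain, k)
--     return total - 1
-- ===== Notes on version B (the rewrite author's own statement) =====
-- stated objective: faster
-- what changed: Replaces the exponential backtracking enumeration of all beautiful subsets by counting: build a value->count map, split the distinct values into residue classes mod k, run a house-robber DP (with 2^c-1 duplicate factors) along each sorted chain, multiply the per-class counts and subtract the empty set (k<=0 handled by closed forms).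
import Mathlib
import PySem

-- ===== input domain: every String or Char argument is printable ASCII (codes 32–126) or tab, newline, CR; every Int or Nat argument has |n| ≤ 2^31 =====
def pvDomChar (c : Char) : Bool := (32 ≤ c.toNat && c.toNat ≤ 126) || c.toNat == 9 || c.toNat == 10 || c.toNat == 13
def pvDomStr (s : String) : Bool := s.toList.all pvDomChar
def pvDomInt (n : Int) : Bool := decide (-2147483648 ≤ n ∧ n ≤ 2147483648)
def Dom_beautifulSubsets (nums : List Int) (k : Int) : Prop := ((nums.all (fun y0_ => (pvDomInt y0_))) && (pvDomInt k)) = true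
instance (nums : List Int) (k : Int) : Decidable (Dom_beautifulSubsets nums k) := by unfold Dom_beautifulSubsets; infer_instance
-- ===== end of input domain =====

-- B replaces A's exponential backtracking enumeration by exact counting: value→count map, residue
-- classes mod k, a house-robber DP along each sorted chain of distinct values, product of the
-- per-class counts, minus the empty set (objective: faster).

-- ===== PORT A =====
-- inner helper isBeautiful: loop with early return False
def pvIsBeautiful (arr : List Int) (candidate : Int) (k : Int) : Bool :=
  match arr with
  | [] => true
  | e :: rest => if |e - candidate| = k then false else pvIsBeautiful rest candidate k

-- inner helper backtracking(index, curr); `rest` plays the role of nums[index:], `answer` accumulates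
def pvBacktrack (k : Int) (rest : List Int) (curr : List Int) (answer : List (List Int)) : List (List Int) :=
  match rest with
  | [] => if curr ≠ [] then answer ++ [curr] else answer
  | x :: rs =>
    let answer1 := if pvIsBeautiful curr x k then pvBacktrack k rs (curr ++ [x]) answer else answer
    pvBacktrack k rs curr answer1

def beautifulSubsets (nums : List Int) (k : Int) : Int :=
  ((pvBacktrack k nums [] []).length : Int)

-- ===== PORT B =====
-- rob(chain, k): backward house-robber over a chain of (value, count), state (g1, g2, v_next)
def pvRob (chain : List (Int × Int)) (k : Int) : Int :=
  (chain.reverse.foldl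
    (fun (st : Int × Int × Option Int) p =>
      let g0 := (2 ^ p.2.toNat - 1) * (if st.2.2 = some (p.1 + k) then st.2.1 else st.1) + st.1
      (g0, st.1, some p.1))
    (1, 1, none)).1

def beautifulSubsets_alt (nums : List Int) (k : Int) : Int :=
  if k < 0 then 2 ^ nums.length - 1
  else
    let counts := nums.foldl (fun d v => d.insert v (d.getD v 0 + 1)) PySem.Dict.empty
    if k = 0 then
      (counts.values.foldl (fun t c => t * (c + 1)) 1) - 1
    else
      let items := PySem.List.sorted counts.items (fun p => p.1) false
      let residues := items.foldl
        (fun (rs : List Int) p =>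
          if rs.contains (PySem.Int.mod p.1 k) then rs else rs ++ [PySem.Int.mod p.1 k]) []
      let total := residues.foldl
        (fun t r => t * pvRob (items.filter (fun p => PySem.Int.mod p.1 k == r)) k) 1
      total - 1

-- ===== PRECONDITION & SPEC =====
def Spec_beautifulSubsets (nums : List Int) (k : Int) (out : Int) : Prop := out = beautifulSubsets_alt nums k
instance (nums : List Int) (k : Int) (out : Int) : Decidable (Spec_beautifulSubsets nums k out) := by unfold Spec_beautifulSubsets; infer_instance

-- ===== CLAIM (what is proved, stated in full; the proofs are below) =====
def Claim_equal_beautifulSubsets : Prop := ∀ (nums : List Int) (k : Int), Dom_beautifulSubsets nums k → Spec_beautifulSubsets nums k (beautifulSubsets nums k)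

-- ===== LEMMAS AND PROOFS =====

-- the counting spec: pvCnt k l ch = number of extensions of the chosen stack ch by a beautiful sublist of l
def pvCnt (k : Int) (l : List Int) (ch : List Int) : Int :=
  match l with
  | [] => 1
  | x :: rs => (if pvIsBeautiful ch x k then pvCnt k rs (ch ++ [x]) else 0) + pvCnt k rs ch

-- the house-robber spec, by recursion from the front of the chain
def pvRobSpec (k : Int) : List (Int × Nat) → Int
  | [] => 1
  | (_, c) :: [] => (2 ^ c - 1) + 1
  | (v, c) :: (w, d) :: t =>
      (2 ^ c - 1) * (if w = v + k then pvRobSpec k t else pvRobSpec k ((w, d) :: t)) + pvRobSpec k ((w, d) :: t)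

def pvFlattenB (bs : List (Int × Nat)) : List Int := bs.flatMap (fun p => List.replicate p.2 p.1)

def pvToBlocks (l : List (Int × Int)) : List (Int × Nat) := l.map (fun p => (p.1, p.2.toNat))

def pvGoodChain (k : Int) (bs : List (Int × Nat)) : Prop :=
  bs.Pairwise (fun p q => p.1 < q.1 ∧ k ∣ (q.1 - p.1))

-- ---------- the guard ----------
theorem pvIsBeautiful_eq_all (arr : List Int) (c k : Int) :
    pvIsBeautiful arr c k = arr.all (fun e => !decide (|e - c| = k)) := by
  induction arr with
  | nil => rfl
  | cons e rest ih => by_cases h : |e - c| = k <;> simp [pvIsBeautiful, ih, h]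

theorem pvIsBeautiful_congr {c1 c2 : List Int} (h : ∀ e, e ∈ c1 ↔ e ∈ c2) (x k : Int) :
    pvIsBeautiful c1 x k = pvIsBeautiful c2 x k := by
  simp only [pvIsBeautiful_eq_all]
  refine Bool.eq_iff_iff.mpr ?_
  simp only [List.all_eq_true]
  exact ⟨fun H e he => H e ((h e).mpr he), fun H e he => H e ((h e).mp he)⟩

theorem pvIsBeautiful_append (a b : List Int) (c k : Int) :
    pvIsBeautiful (a ++ b) c k = (pvIsBeautiful a c k && pvIsBeautiful b c k) := by
  simp [pvIsBeautiful_eq_all, List.all_append]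

theorem pvIsBeautiful_true_of (ch : List Int) (x k : Int) (h : ∀ b ∈ ch, |b - x| ≠ k) :
    pvIsBeautiful ch x k = true := by
  simp only [pvIsBeautiful_eq_all, List.all_eq_true]
  intro e he; simpa using h e he

-- ---------- pvCnt: congruence, permutation, independence ----------
theorem pvCnt_congr (k : Int) (l : List Int) {c1 c2 : List Int} (h : ∀ e, e ∈ c1 ↔ e ∈ c2) :
    pvCnt k l c1 = pvCnt k l c2 := by
  induction l generalizing c1 c2 with
  | nil => rfl
  | cons x rs ih =>
    have hg := pvIsBeautiful_congr h x k
    have h' : ∀ e, e ∈ c1 ++ [x] ↔ e ∈ c2 ++ [x] := by intro e; simp [h e]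
    simp only [pvCnt, hg, ih h, ih h']

theorem pvCnt_perm (k : Int) {l1 l2 : List Int} (h : l1.Perm l2) :
    ∀ ch, pvCnt k l1 ch = pvCnt k l2 ch := by
  induction h with
  | nil => intro ch; rfl
  | cons x h ih => intro ch; simp only [pvCnt, ih]
  | swap x y l =>
    intro ch
    have hsymm : pvIsBeautiful [x] y k = pvIsBeautiful [y] x k := by
      simp [pvIsBeautiful, abs_sub_comm]
    have hcomm : pvCnt k l (ch ++ [y] ++ [x]) = pvCnt k l (ch ++ [x] ++ [y]) :=
      pvCnt_congr _ _ (by intro e; simp; tauto)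
    simp only [pvCnt, pvIsBeautiful_append, hsymm, hcomm]
    by_cases ha : pvIsBeautiful ch x k <;> by_cases hb : pvIsBeautiful ch y k <;>
      by_cases hc : pvIsBeautiful [y] x k <;> simp [ha, hb, hc] <;> ring
  | trans h1 h2 ih1 ih2 => intro ch; rw [ih1, ih2]

theorem pvCnt_irrel (k : Int) (l : List Int) :
    ∀ ch ext : List Int, (∀ b ∈ ext, ∀ a ∈ l, |b - a| ≠ k) →
    pvCnt k l (ch ++ ext) = pvCnt k l ch := by
  induction l with
  | nil => intros; rfl
  | cons x rs ih =>
    intro ch ext h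
    have hg : pvIsBeautiful (ch ++ ext) x k = pvIsBeautiful ch x k := by
      rw [pvIsBeautiful_append]
      have : pvIsBeautiful ext x k = true :=
        pvIsBeautiful_true_of _ _ _ (fun b hb => h b hb x (by simp))
      simp [this]
    have hswap : pvCnt k rs (ch ++ ext ++ [x]) = pvCnt k rs (ch ++ [x] ++ ext) := by
      apply pvCnt_congr; intro e; simp; tauto
    have h' : ∀ b ∈ ext, ∀ a ∈ rs, |b - a| ≠ k := fun b hb a ha => h b hb a (by simp [ha])
    simp only [pvCnt, hg, hswap, ih (ch ++ [x]) ext h', ih ch ext h']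

theorem pvCnt_mult (k : Int) (l1 : List Int) :
    ∀ (l2 ch : List Int), (∀ a ∈ l2, ∀ b, (b ∈ l1 ∨ b ∈ ch) → |b - a| ≠ k) →
    pvCnt k (l1 ++ l2) ch = pvCnt k l1 ch * pvCnt k l2 [] := by
  induction l1 with
  | nil =>
    intro l2 ch h
    have := pvCnt_irrel k l2 [] ch (fun b hb a ha => h a ha b (Or.inr hb))
    simpa [pvCnt] using this
  | cons x rs ih =>
    intro l2 ch h
    have h1 : ∀ a ∈ l2, ∀ b, (b ∈ rs ∨ b ∈ ch ++ [x]) → |b - a| ≠ k := by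
      intro a ha b hb
      rcases hb with hb | hb
      · exact h a ha b (Or.inl (by simp [hb]))
      · rcases List.mem_append.mp hb with hb | hb
        · exact h a ha b (Or.inr hb)
        · simp at hb; exact h a ha b (Or.inl (by simp [hb]))
    have h2 : ∀ a ∈ l2, ∀ b, (b ∈ rs ∨ b ∈ ch) → |b - a| ≠ k := by
      intro a ha b hb
      rcases hb with hb | hb
      · exact h a ha b (Or.inl (by simp [hb]))
      · exact h a ha b (Or.inr hb)
    simp only [List.cons_append, pvCnt, ih l2 (ch ++ [x]) h1, ih l2 ch h2]
    split <;> ring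

theorem pvCnt_prod (k : Int) (gs : List (List Int))
    (h : gs.Pairwise (fun g1 g2 => ∀ a ∈ g2, ∀ b ∈ g1, |b - a| ≠ k)) :
    pvCnt k gs.flatten [] = (gs.map (fun g => pvCnt k g [])).prod := by
  induction gs with
  | nil => rfl
  | cons g gs' ih =>
    rcases List.pairwise_cons.mp h with ⟨hg, h'⟩
    have hcross : ∀ a ∈ gs'.flatten, ∀ b, (b ∈ g ∨ b ∈ ([] : List Int)) → |b - a| ≠ k := by
      intro a ha b hb
      rcases hb with hb | hb
      · rcases List.mem_flatten.mp ha with ⟨g2, hg2, ha2⟩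
        exact hg g2 hg2 a ha2 b hb
      · simp at hb
    simp only [List.flatten_cons, List.map_cons, List.prod_cons]
    rw [pvCnt_mult k g gs'.flatten [] hcross, ih h']

-- ---------- blocks of equal values ----------
theorem pvCnt_block_dead (k v : Int) (c : Nat) :
    ∀ (L ch : List Int), pvIsBeautiful ch v k = false →
    pvCnt k (List.replicate c v ++ L) ch = pvCnt k L ch := by
  induction c with
  | zero => intro L ch _; rfl
  | succ n ih =>
    intro L ch hg
    simp only [List.replicate_succ, List.cons_append, pvCnt, hg]
    simpa using ih L ch hg

theorem pvCnt_block_live (k v : Int) (c : Nat) :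
    ∀ (L ch : List Int), pvIsBeautiful ch v k = true → k ≠ 0 →
    pvCnt k (List.replicate c v ++ L) ch
      = (2 ^ c - 1) * pvCnt k L (ch ++ [v]) + pvCnt k L ch := by
  induction c with
  | zero =>
    intro L ch _ _
    simp only [List.replicate_zero, List.nil_append, pow_zero]
    ring
  | succ n ih =>
    intro L ch hg hk
    have hgv : pvIsBeautiful (ch ++ [v]) v k = true := by
      apply pvIsBeautiful_true_of
      intro b hb
      rcases List.mem_append.mp hb with hb | hb
      · have hall : ∀ e ∈ ch, ¬(|e - v| = k) := by
          simpa [pvIsBeautiful_eq_all, List.all_eq_true] using hg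
        exact hall b hb
      · simp only [List.mem_singleton] at hb
        subst hb
        simp only [sub_self, abs_zero]
        omega
    have hdup : pvCnt k L (ch ++ [v] ++ [v]) = pvCnt k L (ch ++ [v]) := by
      apply pvCnt_congr; intro e; simp
    simp only [List.replicate_succ, List.cons_append, pvCnt, hg, if_true,
      ih L (ch ++ [v]) hgv hk, ih L ch hg hk, hdup, pow_succ]
    ring

theorem pvCnt_zero_block (v : Int) (c : Nat) :
    pvCnt 0 (List.replicate c v) [] = (c : Int) + 1 := by
  induction c with
  | zero => simp [pvCnt]
  | succ n ih =>
    have hdead : pvIsBeautiful [v] v 0 = false := by simp [pvIsBeautiful]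
    have h1 : pvCnt 0 (List.replicate n v) [v] = 1 := by
      have := pvCnt_block_dead 0 v n [] [v] hdead
      simpa [pvCnt] using this
    have hg : pvIsBeautiful [] v 0 = true := rfl
    simp only [List.replicate_succ, pvCnt, hg, if_true, List.nil_append, h1, ih]
    push_cast
    ring

-- ---------- the chain lemma ----------
theorem pv_dvd_ge (k d : Int) (hd : 0 < d) (hdvd : k ∣ d) : k ≤ d :=
  Int.le_of_dvd hd hdvd

theorem pvChain_cnt (k : Int) (hk : 0 < k) :
    ∀ n (bs : List (Int × Nat)), bs.length ≤ n → pvGoodChain k bs →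
    ∀ ch : List Int, (∀ b ∈ ch, ∀ p ∈ bs, |b - p.1| ≠ k) →
    pvCnt k (pvFlattenB bs) ch = pvRobSpec k bs := by
  intro n
  induction n with
  | zero =>
    intro bs hlen _ ch _
    have : bs = [] := List.length_eq_zero_iff.mp (Nat.le_zero.mp hlen)
    subst this; rfl
  | succ n ih =>
    intro bs hlen hgood ch hch
    match bs with
    | [] => rfl
    | (v, c) :: rest =>
      have hgv : pvIsBeautiful ch v k = true :=
        pvIsBeautiful_true_of _ _ _ (fun b hb => hch b hb (v, c) (by simp))
      have hrest_good : pvGoodChain k rest := (List.pairwise_cons.mp hgood).2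
      have hv_rest : ∀ q ∈ rest, v < q.1 ∧ k ∣ (q.1 - v) := by
        intro q hq
        exact (List.pairwise_cons.mp hgood).1 q hq
      have hch_rest : ∀ b ∈ ch, ∀ p ∈ rest, |b - p.1| ≠ k := by
        intro b hb p hp; exact hch b hb p (by simp [hp])
      have hskip : pvCnt k (pvFlattenB rest) ch = pvRobSpec k rest :=
        ih rest (by simpa using Nat.lt_succ_iff.mp (Nat.lt_of_lt_of_le (by simp) hlen)) hrest_good ch hch_rest
      have hstep : pvCnt k (pvFlattenB ((v,c)::rest)) ch
          = (2 ^ c - 1) * pvCnt k (pvFlattenB rest) (ch ++ [v]) + pvCnt k (pvFlattenB rest) ch := by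
        simp only [pvFlattenB, List.flatMap_cons]
        exact pvCnt_block_live k v c _ ch hgv (by omega)
      match rest with
      | [] =>
        rw [hstep]
        simp [pvFlattenB, pvCnt, pvRobSpec]
      | (w, d) :: t =>
        have hlen' : ((w,d)::t).length ≤ n := by simp at hlen ⊢; omega
        have hlent : t.length ≤ n := by simp at hlen ⊢; omega
        have ht_good : pvGoodChain k t := (List.pairwise_cons.mp hrest_good).2
        have hw : v < w ∧ k ∣ (w - v) := hv_rest (w,d) (by simp)
        have hvt : ∀ q ∈ t, v < q.1 ∧ k ∣ (q.1 - v) := fun q hq => hv_rest q (by simp [hq])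
        have hwt : ∀ q ∈ t, w < q.1 ∧ k ∣ (q.1 - w) := by
          intro q hq
          exact (List.pairwise_cons.mp hrest_good).1 q hq
        by_cases hconf : w = v + k
        · -- the next block is banned by taking v
          have hdead : pvIsBeautiful (ch ++ [v]) w k = false := by
            rw [pvIsBeautiful_append]
            have habs : |v - w| = k := by
              subst hconf
              have hx : v - (v + k) = -k := by ring
              rw [hx, abs_neg, abs_of_pos hk]
            have : pvIsBeautiful [v] w k = false := by
              simp [pvIsBeautiful, habs]
            simp [this]
          have hvch : ∀ b ∈ ch ++ [v], ∀ p ∈ t, |b - p.1| ≠ k := by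
            intro b hb p hp
            rcases List.mem_append.mp hb with hb | hb
            · exact hch b hb p (by simp [hp])
            · simp only [List.mem_singleton] at hb; rw [hb]
              have h1 := hvt p hp
              have h2 := hwt p hp
              have h3 : k ≤ p.1 - w := pv_dvd_ge k _ (by omega) h2.2
              have : p.1 - v ≥ 2 * k := by omega
              rw [abs_sub_comm]
              rw [abs_of_pos (by omega)]
              omega
          have htake : pvCnt k (pvFlattenB ((w,d)::t)) (ch ++ [v]) = pvRobSpec k t := by
            simp only [pvFlattenB, List.flatMap_cons]
            rw [pvCnt_block_dead k w d _ _ hdead]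
            have := ih t hlent ht_good (ch ++ [v]) hvch
            simpa [pvFlattenB] using this
          rw [hstep, htake, hskip]
          simp [pvRobSpec, hconf]
        · -- v is harmless to the whole of rest
          have hvch : ∀ b ∈ ch ++ [v], ∀ p ∈ (w,d)::t, |b - p.1| ≠ k := by
            intro b hb p hp
            rcases List.mem_append.mp hb with hb | hb
            · exact hch b hb p (by simp [hp])
            · simp only [List.mem_singleton] at hb; rw [hb]
              have h1 : v < p.1 ∧ k ∣ (p.1 - v) := hv_rest p hp
              have h3 : k ≤ p.1 - v := pv_dvd_ge k _ (by omega) h1.2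
              have hne : p.1 - v ≠ k := by
                rcases List.mem_cons.mp hp with hp' | hp'
                · subst hp'; simp; omega
                · have h2 := hwt p hp'
                  have hw2 : k ≤ w - v := pv_dvd_ge k _ (by omega) hw.2
                  have h4 : k ≤ p.1 - w := pv_dvd_ge k _ (by omega) h2.2
                  omega
              rw [abs_sub_comm, abs_of_pos (by omega)]
              exact hne
          have htake : pvCnt k (pvFlattenB ((w,d)::t)) (ch ++ [v]) = pvRobSpec k ((w,d)::t) :=
            ih ((w,d)::t) hlen' hrest_good (ch ++ [v]) hvch
          rw [hstep, htake, hskip]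
          simp [pvRobSpec, hconf]

-- ---------- pvRob computes pvRobSpec ----------
theorem pvRob_state (k : Int) (chain : List (Int × Int)) :
    chain.foldr
      (fun p (st : Int × Int × Option Int) =>
        let g0 := (2 ^ p.2.toNat - 1) * (if st.2.2 = some (p.1 + k) then st.2.1 else st.1) + st.1
        (g0, st.1, some p.1))
      (1, 1, none)
    = (pvRobSpec k (pvToBlocks chain), pvRobSpec k (pvToBlocks chain.tail), chain.head?.map Prod.fst) := by
  induction chain with
  | nil => simp [pvToBlocks, pvRobSpec]
  | cons p t ih =>
    rw [List.foldr_cons, ih]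
    match t with
    | [] => simp [pvToBlocks, pvRobSpec]
    | q :: t' =>
      by_cases hc : q.1 = p.1 + k <;> simp [pvToBlocks, pvRobSpec, hc]

theorem pvRob_eq_robSpec (k : Int) (chain : List (Int × Int)) :
    pvRob chain k = pvRobSpec k (pvToBlocks chain) := by
  rw [pvRob, List.foldl_reverse]
  exact congrArg Prod.fst (pvRob_state k chain)

-- ---------- A = cnt - 1 ----------
theorem pvBacktrack_len (k : Int) (l : List Int) :
    ∀ (curr : List Int) (ans : List (List Int)),
      ((pvBacktrack k l curr ans).length : Int)
        = ans.length + pvCnt k l curr - (if curr = [] then 1 else 0) := by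
  induction l with
  | nil =>
    intro curr ans
    by_cases h : curr = [] <;> simp [pvBacktrack, pvCnt, h]
  | cons x rs ih =>
    intro curr ans
    by_cases hg : pvIsBeautiful curr x k
    · have hne : ¬(curr ++ [x] = []) := by simp
      simp only [pvBacktrack, hg, if_true, pvCnt, ih, if_neg hne]
      split <;> ring
    · simp only [pvBacktrack, hg, pvCnt, ih]
      simp only [Bool.false_eq_true, if_false]
      ring

theorem pvA_eq_cnt (nums : List Int) (k : Int) :
    beautifulSubsets nums k = pvCnt k nums [] - 1 := by
  have := pvBacktrack_len k nums [] []
  simpa [beautifulSubsets] using this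

-- ---------- the three regimes ----------
theorem pvCnt_neg (k : Int) (hk : k < 0) (l : List Int) :
    ∀ ch, pvCnt k l ch = 2 ^ l.length := by
  induction l with
  | nil => intro ch; rfl
  | cons x rs ih =>
    intro ch
    have hg : pvIsBeautiful ch x k = true := by
      rw [pvIsBeautiful_eq_all]
      simp only [List.all_eq_true]
      intro e he
      have := abs_nonneg (e - x)
      simp only [Bool.not_eq_eq_eq_not, Bool.not_true, decide_eq_false_iff_not]
      omega
    simp only [pvCnt, hg, if_true, ih, List.length_cons, pow_succ]
    ring

-- ---------- generic plumbing ----------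
theorem pv_foldl_prod {β : Type} (f : β → Int) (l : List β) :
    ∀ a : Int, l.foldl (fun t r => t * f r) a = a * (l.map f).prod := by
  induction l with
  | nil => intro a; simp
  | cons x rs ih => intro a; simp only [List.foldl_cons, List.map_cons, List.prod_cons, ih]; ring

theorem pv_count_flat (n : Int → Nat) :
    ∀ (D : List Int), D.Nodup → ∀ x : Int,
      (D.flatMap (fun v => List.replicate (n v) v)).count x = if x ∈ D then n x else 0 := by
  intro D
  induction D with
  | nil => intro _ x; simp
  | cons v D' ih =>
    intro hnd x
    rcases List.nodup_cons.mp hnd with ⟨hv, hnd'⟩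
    simp only [List.flatMap_cons, List.count_append, List.count_replicate, ih hnd' x]
    by_cases hx : x = v
    · subst hx
      simp [hv]
    · simp [hx, Ne.symm hx]

theorem pv_repl_perm (xs : List Int) :
    ((PySem.Set.ofList xs).flatMap (fun v => List.replicate (xs.count v) v)).Perm xs := by
  rw [List.perm_iff_count]
  intro x
  rw [pv_count_flat (fun v => xs.count v) _ (PySem.Set.nodup_ofList xs) x]
  by_cases hx : x ∈ xs
  · simp [PySem.Set.mem_ofList, hx]
  · simp [PySem.Set.mem_ofList, hx, List.count_eq_zero_of_not_mem hx]

theorem pv_partition {α : Type} (f : α → Int) :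
    ∀ (rs : List Int) (l : List α), rs.Nodup → (∀ x ∈ l, f x ∈ rs) →
      l.Perm (rs.flatMap (fun r => l.filter (fun x => f x == r))) := by
  intro rs
  induction rs with
  | nil =>
    intro l _ h
    have : l = [] := by
      cases l with
      | nil => rfl
      | cons a t => exact absurd (h a (List.mem_cons_self)) (by simp)
    simp [this]
  | cons r rs' ih =>
    intro l hnd h
    rcases List.nodup_cons.mp hnd with ⟨hr, hnd'⟩
    have hsplit : (l.filter (fun x => f x == r) ++ l.filter (fun x => !(f x == r))).Perm l :=
      List.filter_append_perm _ l
    have h2 : ∀ x ∈ l.filter (fun x => !(f x == r)), f x ∈ rs' := by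
      intro x hx
      rcases List.mem_filter.mp hx with ⟨hxl, hne⟩
      have := h x hxl
      simp only [List.mem_cons] at this
      rcases this with h' | h'
      · simp [h'] at hne
      · exact h'
    have ihp := ih (l.filter (fun x => !(f x == r))) hnd' h2
    have hsame : ∀ r' ∈ rs',
        (l.filter (fun x => !(f x == r))).filter (fun x => f x == r')
          = l.filter (fun x => f x == r') := by
      intro r' hr'
      have hner : r' ≠ r := fun he => hr (he ▸ hr')
      rw [List.filter_filter]
      apply List.filter_congr
      intro x _
      by_cases hx : f x = r'
      · simp [hx, hner]
      · simp [hx]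
    have hflat : rs'.flatMap (fun r' => (l.filter (fun x => !(f x == r))).filter (fun x => f x == r'))
        = rs'.flatMap (fun r' => l.filter (fun x => f x == r')) := by
      apply List.flatMap_congr hsame
    refine hsplit.symm.trans ?_
    rw [List.flatMap_cons]
    exact List.Perm.append_left _ (ihp.trans (hflat ▸ List.Perm.refl _))

-- residues mod k (k > 0): different residues can never differ by exactly k
theorem pv_mod_harmless (k a b : Int) (hk : 0 < k)
    (hne : PySem.Int.mod a k ≠ PySem.Int.mod b k) : |b - a| ≠ k := by
  intro habs
  apply hne
  rw [PySem.Int.mod_eq_emod_of_pos hk, PySem.Int.mod_eq_emod_of_pos hk]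
  rcases (abs_eq (le_of_lt hk)).mp habs with h | h
  · rw [show b = a + k by omega]
    exact Int.emod_eq_add_self_emod
  · rw [show a = b + k by omega]
    exact (Int.emod_eq_add_self_emod).symm

theorem pv_mod_dvd (k a b : Int) (hk : 0 < k)
    (he : PySem.Int.mod a k = PySem.Int.mod b k) : k ∣ (b - a) := by
  rw [PySem.Int.mod_eq_emod_of_pos hk, PySem.Int.mod_eq_emod_of_pos hk] at he
  apply Int.dvd_of_emod_eq_zero
  rw [Int.sub_emod, he]
  simp

-- ---------- the k > 0 branch of B ----------
theorem pvB_pos (nums : List Int) (k : Int) (hk : 0 < k) :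
    (let items := PySem.List.sorted (PySem.Dict.counter nums).items (fun p => p.1) false
     let residues := items.foldl
        (fun (rs : List Int) p =>
          if rs.contains (PySem.Int.mod p.1 k) then rs else rs ++ [PySem.Int.mod p.1 k]) []
     residues.foldl
        (fun t r => t * pvRob (items.filter (fun p => PySem.Int.mod p.1 k == r)) k) 1)
    = pvCnt k nums [] := by
  simp only []
  set items0 := (PySem.Dict.counter nums).items with hitems0def
  set items := PySem.List.sorted items0 (fun p => p.1) false with hitemsdef
  have hitems0 : items0 = (PySem.Set.ofList nums).map (fun v => (v, (nums.count v : Int))) :=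
    PySem.Dict.items_counter nums
  have hperm0 : items.Perm items0 := PySem.List.sorted_perm items0 (fun p => p.1) false
  -- keys of items are nodup
  have hkeys0 : items0.map (fun p => p.1) = PySem.Set.ofList nums := by
    rw [hitems0, List.map_map,
      show ((fun p : Int × Int => p.1) ∘ fun v : Int => (v, (nums.count v : Int))) = id from rfl,
      List.map_id]
  have hndmap : (items.map (fun p => p.1)).Nodup := by
    refine ((hperm0.map (fun p => p.1)).nodup_iff).mpr ?_
    rw [hkeys0]; exact PySem.Set.nodup_ofList nums
  have hlt : items.Pairwise (fun p q => p.1 < q.1) := by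
    have hle : items.Pairwise (fun p q => p.1 ≤ q.1) :=
      PySem.List.sorted_pairwise items0 (fun p => p.1)
    have hne : items.Pairwise (fun p q => p.1 ≠ q.1) := List.pairwise_map.mp hndmap
    exact (hle.and hne).imp (fun h => lt_of_le_of_ne h.1 h.2)
  have hmem : ∀ p ∈ items, p.1 ∈ nums ∧ p.2 = (nums.count p.1 : Int) := by
    intro p hp
    have : p ∈ items0 := hperm0.mem_iff.mp hp
    rw [hitems0] at this
    rcases List.mem_map.mp this with ⟨v, hv, rfl⟩
    exact ⟨(PySem.Set.mem_ofList _ _).mp hv, rfl⟩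
  -- residues
  set f : Int × Int → Int := fun p => PySem.Int.mod p.1 k with hfdef
  have hres : items.foldl
      (fun (rs : List Int) p =>
        if rs.contains (PySem.Int.mod p.1 k) then rs else rs ++ [PySem.Int.mod p.1 k]) []
      = PySem.Set.ofList (items.map f) := by
    rw [PySem.Set.ofList_eq_foldl, List.foldl_map]
    rfl
  rw [hres]
  set residues := PySem.Set.ofList (items.map f) with hresdef
  have hrnd : residues.Nodup := PySem.Set.nodup_ofList (items.map f)
  have hrmem : ∀ p ∈ items, f p ∈ residues := by
    intro p hp
    exact (PySem.Set.mem_ofList _ _).mpr (List.mem_map_of_mem hp)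
  have hpart : items.Perm (residues.flatMap (fun r => items.filter (fun p => f p == r))) :=
    pv_partition f residues items hrnd hrmem
  -- groups
  set G : Int → List Int := fun r => pvFlattenB (pvToBlocks (items.filter (fun p => f p == r))) with hGdef
  have hFB : ∀ (l : List (Int × Int)),
      pvFlattenB (pvToBlocks l) = l.flatMap (fun p => List.replicate p.2.toNat p.1) := by
    intro l
    rw [pvFlattenB, pvToBlocks, List.flatMap_map]
  have hflat : (residues.map G).flatten.Perm nums := by
    rw [← List.flatMap_def]
    have e1 : residues.flatMap G
        = (residues.flatMap (fun r => items.filter (fun p => f p == r))).flatMap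
            (fun p => List.replicate p.2.toNat p.1) := by
      rw [List.flatMap_assoc]
      simp only [hGdef, hFB]
    rw [e1]
    refine (List.Perm.flatMap_right _ hpart.symm).trans ?_
    refine (List.Perm.flatMap_right _ hperm0).trans ?_
    rw [hitems0, List.flatMap_map]
    simp only [Int.toNat_natCast]
    exact pv_repl_perm nums
  -- cross-compatibility between groups
  have hmodmem : ∀ r, ∀ a ∈ G r, PySem.Int.mod a k = r := by
    intro r a ha
    rw [hGdef] at ha
    simp only [hFB] at ha
    rcases List.mem_flatMap.mp ha with ⟨p, hp, hap⟩
    rcases List.mem_filter.mp hp with ⟨_, hpr⟩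
    rw [List.eq_of_mem_replicate hap]
    exact beq_iff_eq.mp hpr
  have hpair : (residues.map G).Pairwise (fun g1 g2 => ∀ a ∈ g2, ∀ b ∈ g1, |b - a| ≠ k) := by
    apply List.pairwise_map.mpr
    apply hrnd.imp
    intro r1 r2 hne a ha b hb
    exact pv_mod_harmless k a b hk (by rw [hmodmem r2 a ha, hmodmem r1 b hb]; exact fun h => hne h.symm)
  -- per-residue house robber
  have hgrp : ∀ r ∈ residues, pvCnt k (G r) [] = pvRob (items.filter (fun p => f p == r)) k := by
    intro r _
    have hpf : (items.filter (fun p => f p == r)).Pairwise (fun p q => p.1 < q.1) :=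
      hlt.filter _
    have hgood : pvGoodChain k (pvToBlocks (items.filter (fun p => f p == r))) := by
      rw [pvGoodChain, pvToBlocks]
      apply List.pairwise_map.mpr
      refine List.Pairwise.imp_of_mem ?_ hpf
      intro p q hp hq hlt'
      refine ⟨hlt', ?_⟩
      have hpr : f p = r := beq_iff_eq.mp (List.mem_filter.mp hp).2
      have hqr : f q = r := beq_iff_eq.mp (List.mem_filter.mp hq).2
      exact pv_mod_dvd k p.1 q.1 hk (hpr.trans hqr.symm)
    rw [hGdef]
    rw [pvChain_cnt k hk (pvToBlocks (items.filter (fun p => f p == r))).length _ le_rfl hgood []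
        (by intro b hb; simp at hb)]
    exact (pvRob_eq_robSpec k _).symm
  -- assemble
  rw [pv_foldl_prod (fun r => pvRob (items.filter (fun p => PySem.Int.mod p.1 k == r)) k) residues 1]
  rw [pvCnt_perm k hflat.symm [], pvCnt_prod k _ hpair, List.map_map]
  rw [one_mul]
  refine congrArg List.prod (List.map_congr_left ?_)
  intro r hr
  simp only [Function.comp]
  exact (hgrp r hr).symm

-- ---------- B = cnt - 1 ----------
theorem pvB_eq_cnt (nums : List Int) (k : Int) :
    beautifulSubsets_alt nums k = pvCnt k nums [] - 1 := by
  by_cases hneg : k < 0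
  · rw [beautifulSubsets_alt, if_pos hneg, pvCnt_neg k hneg nums []]
  rw [beautifulSubsets_alt, if_neg hneg]
  rw [show nums.foldl (fun d v => d.insert v (d.getD v 0 + 1)) PySem.Dict.empty
        = PySem.Dict.counter nums from PySem.Dict.foldl_insert_getD_add_one_eq_counter nums]
  by_cases hzero : k = 0
  · subst hzero
    rw [if_pos rfl]
    have hvals : (PySem.Dict.counter nums).values
        = (PySem.Set.ofList nums).map (fun v => (nums.count v : Int)) := by
      rw [show (PySem.Dict.counter nums).values
            = (PySem.Dict.counter nums).items.map (fun p => p.2) from rfl,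
          PySem.Dict.items_counter, List.map_map]
      rfl
    have hfold := pv_foldl_prod (fun c : Int => c + 1) (PySem.Dict.counter nums).values 1
    rw [hfold, hvals, List.map_map]
    have hperm : ((PySem.Set.ofList nums).map
        (fun v => List.replicate (nums.count v) v)).flatten.Perm nums := by
      rw [← List.flatMap_def]
      exact pv_repl_perm nums
    have hpair : ((PySem.Set.ofList nums).map
        (fun v => List.replicate (nums.count v) v)).Pairwise
          (fun g1 g2 => ∀ a ∈ g2, ∀ b ∈ g1, |b - a| ≠ (0:Int)) := by
      apply List.pairwise_map.mpr
      have hnd : (PySem.Set.ofList nums).Pairwise (· ≠ ·) := PySem.Set.nodup_ofList nums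
      apply hnd.imp
      intro v1 v2 hne a ha b hb
      rw [List.eq_of_mem_replicate ha, List.eq_of_mem_replicate hb]
      simpa using sub_ne_zero.mpr hne
    have hcnt : pvCnt 0 nums [] = ((PySem.Set.ofList nums).map
        (fun v => (nums.count v : Int) + 1)).prod := by
      rw [pvCnt_perm 0 hperm.symm [], pvCnt_prod 0 _ hpair, List.map_map]
      congr 1
      apply List.map_congr_left
      intro v _
      exact pvCnt_zero_block v (nums.count v)
    rw [hcnt]
    norm_num
    rfl
  · rw [if_neg hzero]
    have h := pvB_pos nums k (lt_of_le_of_ne (not_lt.mp hneg) (Ne.symm hzero))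
    exact congrArg (fun z => z - 1) h

-- ===== VERDICT (by name: the statement is the Claim_ definition above) =====
theorem beautifulSubsets_spec : Claim_equal_beautifulSubsets := by
  intro nums k _
  unfold Spec_beautifulSubsets
  rw [pvA_eq_cnt, pvB_eq_cnt]
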